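-- pv_equiv track=rewrite | github.com/huanghaodong1997/lc | Intuit/ValidMatrix.py | validMatrix
-- ===== SOURCE A (Python) =====
-- def validMatrix(grid):
--     n = len(grid)
--
--     for i in range(n):
--
--         rowSet = set()
--         colSet = set()
--
--         for j in range(n):
--             if grid[i][j] < 1 or grid[i][j] > n:
--                 return False
--             if grid[j][i] < 1 or grid[j][i] > n:
--                 return False
--
--             if grid[i][j] in rowSet:
--                 return False
--
--             if grid[j][i] in colSet:
--                 return False
--
--             rowSet.add(grid[i][j])
--             colSet.add(grid[j][i])
--     return True
-- ===== SOURCE B (Python) =====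
-- def validMatrix(grid):
--     n = len(grid)
--     expected = set(range(1, n + 1))
--     for row in grid:
--         if set(row) != expected:
--             return False
--     for i in range(n):
--         if set(row[i] for row in grid) != expected:
--             return False
--     return True
-- ===== Notes on version B (the rewrite author's own statement) =====
-- stated objective: simpler
-- what changed: Replaces A's interleaved per-cell bounds checks and incremental row/column set insertion by two uniform passes that compare set(row) and set(column) against a precomputed reference set {1..n}; Pre_ admits square grids plus any grid rejected at its very first cell, and excludes the remaining ragged grids, on which A's mix of early False and IndexError is an accident of its traversal order (e.g. A never reads row entries beyond column n).
-- outside the precondition, e.g. on validMatrix([[1, 2, 3], [2, 1]]): A returns True, B returns False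
import Mathlib
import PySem

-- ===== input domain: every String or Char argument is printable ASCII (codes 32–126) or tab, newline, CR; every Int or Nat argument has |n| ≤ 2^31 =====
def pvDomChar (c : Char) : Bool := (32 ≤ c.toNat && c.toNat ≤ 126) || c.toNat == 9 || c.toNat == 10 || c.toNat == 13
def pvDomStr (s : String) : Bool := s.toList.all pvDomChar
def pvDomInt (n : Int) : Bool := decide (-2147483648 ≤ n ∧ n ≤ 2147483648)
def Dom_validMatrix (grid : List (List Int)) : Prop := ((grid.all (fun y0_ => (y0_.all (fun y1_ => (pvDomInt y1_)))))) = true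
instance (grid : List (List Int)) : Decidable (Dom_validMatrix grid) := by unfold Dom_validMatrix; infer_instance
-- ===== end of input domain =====

-- B replaces A's interleaved per-cell bounds/duplicate checks by two uniform passes comparing
-- each row set and each column set against the reference set {1..n} (simpler decomposition, same cost class).

-- ===== PORT A =====
-- grid[i][j] (both indices are nonnegative loop counters); total form, Pre_ keeps every index in range
def pvGetA (grid : List (List Int)) (i j : Nat) : Int :=
  PySem.List.pyGetD (PySem.List.pyGetD grid (i : Int) []) (j : Int) 0

-- the inner 'for j in range(n)' loop of A; rem = iterations left, j = current index
def vmLoopJ (grid : List (List Int)) (n i : Nat) (j : Nat) (rem : Nat)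
    (rowSet colSet : PySem.Set Int) : Bool :=
  match rem with
  | 0 => true
  | rem' + 1 =>
      let a := pvGetA grid i j
      let b := pvGetA grid j i
      if a < 1 || a > (n : Int) then false
      else if b < 1 || b > (n : Int) then false
      else if PySem.Set.contains rowSet a then false
      else if PySem.Set.contains colSet b then false
      else vmLoopJ grid n i (j + 1) rem' (PySem.Set.add rowSet a) (PySem.Set.add colSet b)

-- the outer 'for i in range(n)' loop of A
def vmLoopI (grid : List (List Int)) (n : Nat) (i : Nat) (rem : Nat) : Bool :=
  match rem with
  | 0 => true
  | rem' + 1 =>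
      if vmLoopJ grid n i 0 n PySem.Set.empty PySem.Set.empty then
        vmLoopI grid n (i + 1) rem'
      else false

def validMatrix (grid : List (List Int)) : Bool :=
  vmLoopI grid grid.length 0 grid.length

-- ===== PORT B =====
-- expected = set(range(1, n + 1))
def vmExpected (n : Nat) : PySem.Set Int :=
  PySem.Set.ofList (PySem.List.pyRange 1 ((n : Int) + 1) 1)

-- for row in grid: if set(row) != expected: return False
def vmRowPass (rows : List (List Int)) (expected : PySem.Set Int) : Bool :=
  match rows with
  | [] => true
  | row :: rest =>
      if !(PySem.Set.equal (PySem.Set.ofList row) expected) then false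
      else vmRowPass rest expected

-- for i in range(n): if set(row[i] for row in grid) != expected: return False
def vmColPass (grid : List (List Int)) (expected : PySem.Set Int) (i : Nat) (rem : Nat) : Bool :=
  match rem with
  | 0 => true
  | rem' + 1 =>
      let col := grid.map (fun row => PySem.List.pyGetD row (i : Int) 0)
      if !(PySem.Set.equal (PySem.Set.ofList col) expected) then false
      else vmColPass grid expected (i + 1) rem'

def validMatrix_alt (grid : List (List Int)) : Bool :=
  let n := grid.length
  let expected := vmExpected n
  if vmRowPass grid expected then vmColPass grid expected 0 n else false

-- ===== PRECONDITION & SPEC =====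
-- Pre_ excludes non-square (ragged) grids whose very first cell is in range, on which A's mixture of
-- early False and IndexError is an accident of its traversal order (A never even reads row entries
-- beyond column n); non-square grids rejected at cell (0,0) stay inside (both programs return False).
def Pre_validMatrix (grid : List (List Int)) : Prop :=
  (∀ row ∈ grid, row.length = grid.length) ∨
  (0 < grid.length ∧ 0 < (grid.getD 0 []).length ∧
    ((grid.getD 0 []).getD 0 0 < 1 ∨ (grid.length : Int) < (grid.getD 0 []).getD 0 0))
instance (grid : List (List Int)) : Decidable (Pre_validMatrix grid) := by
  unfold Pre_validMatrix; infer_instance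

def pvWitness_validMatrix : List (List Int) := [[2, 1], [1, 2]]

def Spec_validMatrix (grid : List (List Int)) (out : Bool) : Prop := out = validMatrix_alt grid
instance (grid : List (List Int)) (out : Bool) : Decidable (Spec_validMatrix grid out) := by
  unfold Spec_validMatrix; infer_instance

-- ===== CLAIM (what is proved, stated in full; the proofs are below) =====
def Claim_equal_validMatrix : Prop := ∀ (grid : List (List Int)), Dom_validMatrix grid → Pre_validMatrix grid → Spec_validMatrix grid (validMatrix grid)

-- ===== LEMMAS AND PROOFS =====

-- the bounds predicate '1 <= x <= n' and the index forms of "row/column i is bounds-clean and duplicate-free"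
def vmInB (n : Nat) (x : Int) : Prop := 1 ≤ x ∧ x ≤ (n : Int)

def vmRowP (grid : List (List Int)) (n i : Nat) : Prop :=
  (∀ k < n, vmInB n (pvGetA grid i k)) ∧
  (∀ k < n, ∀ k' < k, pvGetA grid i k' ≠ pvGetA grid i k)

def vmColP (grid : List (List Int)) (n i : Nat) : Prop :=
  (∀ k < n, vmInB n (pvGetA grid k i)) ∧
  (∀ k < n, ∀ k' < k, pvGetA grid k' i ≠ pvGetA grid k i)

theorem vm_forall_lt_succ {m : Nat} {Q : Nat → Prop} :
    (∀ k < m + 1, Q k) ↔ Q 0 ∧ (∀ k < m, Q (k + 1)) := by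
  constructor
  · intro h; exact ⟨h 0 (Nat.succ_pos m), fun k hk => h (k + 1) (by omega)⟩
  · rintro ⟨h0, hs⟩ k hk
    cases k with
    | zero => exact h0
    | succ k => exact hs k (by omega)

-- characterisation of A's inner loop: it succeeds iff every remaining cell is in bounds,
-- avoids the accumulated sets, and repeats no earlier remaining cell
theorem vmLoopJ_iff (grid : List (List Int)) (n i : Nat) :
    ∀ (rem j : Nat) (S T : PySem.Set Int),
    vmLoopJ grid n i j rem S T = true ↔
      ∀ k < rem,
        vmInB n (pvGetA grid i (j + k)) ∧
        vmInB n (pvGetA grid (j + k) i) ∧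
        pvGetA grid i (j + k) ∉ S ∧ pvGetA grid (j + k) i ∉ T ∧
        (∀ k' < k, pvGetA grid i (j + k') ≠ pvGetA grid i (j + k) ∧
                   pvGetA grid (j + k') i ≠ pvGetA grid (j + k) i) := by
  intro rem
  induction rem with
  | zero => intro j S T; simp [vmLoopJ]
  | succ rem ih =>
      intro j S T
      rw [vm_forall_lt_succ]
      simp only [vmLoopJ]
      split_ifs with h1 h2 h3 h4
      · simp only [Bool.or_eq_true, decide_eq_true_eq] at h1
        constructor
        · intro h; cases h
        · rintro ⟨⟨⟨hb1, hb2⟩, -⟩, -⟩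
          simp only [Nat.add_zero] at hb1 hb2
          omega
      · simp only [Bool.or_eq_true, decide_eq_true_eq] at h2
        constructor
        · intro h; cases h
        · rintro ⟨⟨-, ⟨hb1, hb2⟩, -⟩, -⟩
          simp only [Nat.add_zero] at hb1 hb2
          omega
      · rw [PySem.Set.contains_iff] at h3
        constructor
        · intro h; cases h
        · rintro ⟨⟨-, -, hna, -⟩, -⟩
          simp only [Nat.add_zero] at hna
          exact absurd h3 hna
      · rw [PySem.Set.contains_iff] at h4
        constructor
        · intro h; cases h
        · rintro ⟨⟨-, -, -, hnb, -⟩, -⟩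
          simp only [Nat.add_zero] at hnb
          exact absurd h4 hnb
      · -- all four checks passed: recurse
        rw [ih (j + 1) (PySem.Set.add S (pvGetA grid i j)) (PySem.Set.add T (pvGetA grid j i))]
        simp only [Bool.or_eq_true, decide_eq_true_eq, not_or, not_lt] at h1 h2
        rw [PySem.Set.contains_iff] at h3 h4
        constructor
        · intro h
          refine ⟨⟨?_, ?_, ?_, ?_, ?_⟩, ?_⟩
          · simpa [Nat.add_zero, vmInB] using And.intro h1.1 h1.2
          · simpa [Nat.add_zero, vmInB] using And.intro h2.1 h2.2
          · simpa [Nat.add_zero] using h3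
          · simpa [Nat.add_zero] using h4
          · intro k' hk'; omega
          · intro k hk
            obtain ⟨hba, hbb, hna, hnb, hprev⟩ := h k hk
            rw [PySem.Set.mem_add] at hna hnb
            rw [not_or] at hna hnb
            have e : j + (k + 1) = j + 1 + k := by omega
            rw [e]
            refine ⟨hba, hbb, hna.1, hnb.1, ?_⟩
            intro k' hk'
            cases k' with
            | zero =>
                simp only [Nat.add_zero]
                exact ⟨Ne.symm hna.2, Ne.symm hnb.2⟩
            | succ k'' =>
                have e2 : j + (k'' + 1) = j + 1 + k'' := by omega
                rw [e2]
                exact hprev k'' (by omega)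
        · rintro ⟨-, hs⟩ k hk
          have hQ := hs k hk
          have e : j + (k + 1) = j + 1 + k := by omega
          rw [e] at hQ
          obtain ⟨hba, hbb, hna, hnb, hprev⟩ := hQ
          have h0 := hprev 0 (by omega)
          simp only [Nat.add_zero] at h0
          refine ⟨hba, hbb, ?_, ?_, ?_⟩
          · rw [PySem.Set.mem_add, not_or]; exact ⟨hna, Ne.symm h0.1⟩
          · rw [PySem.Set.mem_add, not_or]; exact ⟨hnb, Ne.symm h0.2⟩
          · intro k' hk'
            have e2 : j + (k' + 1) = j + 1 + k' := by omega
            have := hprev (k' + 1) (by omega)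
            rw [e2] at this
            exact this

-- characterisation of A's outer loop
theorem vmLoopI_iff (grid : List (List Int)) (n : Nat) :
    ∀ (rem i : Nat),
    vmLoopI grid n i rem = true ↔
      ∀ k < rem, vmLoopJ grid n (i + k) 0 n PySem.Set.empty PySem.Set.empty = true := by
  intro rem
  induction rem with
  | zero => intro i; simp [vmLoopI]
  | succ rem ih =>
      intro i
      rw [vm_forall_lt_succ]
      simp only [vmLoopI, Nat.add_zero]
      split_ifs with hJ
      · rw [ih (i + 1)]
        constructor
        · intro h
          refine ⟨hJ, fun k hk => ?_⟩
          have e : i + (k + 1) = i + 1 + k := by omega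
          rw [e]; exact h k hk
        · rintro ⟨-, hs⟩ k hk
          have e : i + (k + 1) = i + 1 + k := by omega
          have := hs k hk
          rwa [e] at this
      · constructor
        · intro h; cases h
        · rintro ⟨h0, -⟩; exact absurd h0 hJ

theorem vmRowPass_iff (e : PySem.Set Int) :
    ∀ rows : List (List Int),
    vmRowPass rows e = true ↔ ∀ row ∈ rows, PySem.Set.equal (PySem.Set.ofList row) e = true := by
  intro rows
  induction rows with
  | nil => simp [vmRowPass]
  | cons r rest ih =>
      simp only [vmRowPass]
      split_ifs with h
      · simp only [Bool.not_eq_true'] at h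
        constructor
        · intro hf; cases hf
        · intro hall
          exact absurd (hall r (List.mem_cons_self)) (by simp [h])
      · simp only [Bool.not_eq_true', Bool.not_eq_false] at h
        rw [ih]
        constructor
        · intro hr row hrow
          rcases List.mem_cons.mp hrow with he | hm
          · rw [he]; exact h
          · exact hr row hm
        · intro hall row hm
          exact hall row (List.mem_cons_of_mem _ hm)

theorem vmColPass_iff (grid : List (List Int)) (e : PySem.Set Int) :
    ∀ (rem i : Nat),
    vmColPass grid e i rem = true ↔
      ∀ k < rem,
        PySem.Set.equal
          (PySem.Set.ofList (grid.map (fun row => PySem.List.pyGetD row ((i + k : Nat) : Int) 0))) e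
          = true := by
  intro rem
  induction rem with
  | zero => intro i; simp [vmColPass]
  | succ rem ih =>
      intro i
      rw [vm_forall_lt_succ]
      simp only [vmColPass]
      split_ifs with h
      · simp only [Bool.not_eq_true'] at h
        constructor
        · intro hfalse; cases hfalse
        · rintro ⟨h0, -⟩
          simp only [Nat.add_zero] at h0
          rw [h0] at h; cases h
      · simp only [Bool.not_eq_true', Bool.not_eq_false] at h
        rw [ih (i + 1)]
        constructor
        · intro hr
          refine ⟨by simpa [Nat.add_zero] using h, fun k hk => ?_⟩
          have e2 : i + (k + 1) = i + 1 + k := by omega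
          rw [e2]; exact hr k hk
        · rintro ⟨-, hs⟩ k hk
          have e2 : i + (k + 1) = i + 1 + k := by omega
          have := hs k hk
          rwa [e2] at this

-- pigeonhole: a length-n integer list is "all in 1..n and duplicate-free" iff its members are exactly 1..n
theorem vm_perm_iff (l : List Int) (n : Nat) (hl : l.length = n) :
    ((∀ x ∈ l, 1 ≤ x ∧ x ≤ (n : Int)) ∧ l.Nodup) ↔
      (∀ x : Int, x ∈ l ↔ 1 ≤ x ∧ x ≤ (n : Int)) := by
  have hcard : (Finset.Icc (1 : Int) (n : Int)).card = n := by
    rw [Int.card_Icc]; omega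
  constructor
  · rintro ⟨hb, hnd⟩ x
    have hsub : l.toFinset ⊆ Finset.Icc (1 : Int) (n : Int) := by
      intro y hy
      rw [List.mem_toFinset] at hy
      rw [Finset.mem_Icc]
      exact hb y hy
    have heq : l.toFinset = Finset.Icc (1 : Int) (n : Int) := by
      apply Finset.eq_of_subset_of_card_le hsub
      rw [List.toFinset_card_of_nodup hnd, hl, hcard]
    constructor
    · intro hx
      have hx2 : x ∈ l.toFinset := List.mem_toFinset.mpr hx
      rw [heq, Finset.mem_Icc] at hx2
      exact hx2
    · intro hx
      have : x ∈ l.toFinset := heq ▸ (Finset.mem_Icc.mpr hx)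
      exact List.mem_toFinset.mp this
  · intro h
    have heq : l.toFinset = Finset.Icc (1 : Int) (n : Int) := by
      ext x
      rw [List.mem_toFinset, Finset.mem_Icc, h x]
    have hdlen : l.dedup.length = l.length := by
      have := List.card_toFinset l
      rw [heq, hcard] at this
      omega
    have hdd : l.dedup = l := (List.dedup_sublist l).eq_of_length hdlen
    refine ⟨fun x hx => (h x).mp hx, List.dedup_eq_self.mp hdd⟩

theorem vm_mem_expected (n : Nat) (x : Int) :
    x ∈ vmExpected n ↔ 1 ≤ x ∧ x ≤ (n : Int) := by
  rw [vmExpected, PySem.Set.mem_ofList, PySem.List.mem_pyRange_one]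
  omega

-- Python's 'set(l) == set(range(1, n+1))' for a length-n list is exactly "bounds + no duplicates"
theorem vm_equal_expected_iff (l : List Int) (n : Nat) (hl : l.length = n) :
    PySem.Set.equal (PySem.Set.ofList l) (vmExpected n) = true ↔
      ((∀ x ∈ l, 1 ≤ x ∧ x ≤ (n : Int)) ∧ l.Nodup) := by
  rw [PySem.Set.equal_iff, vm_perm_iff l n hl]
  constructor
  · intro h x
    rw [← vm_mem_expected n x, ← PySem.Set.mem_ofList (y := x) (xs := l)]
    exact h x
  · intro h x
    rw [PySem.Set.mem_ofList, h x, vm_mem_expected]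

-- in-range double indexing agrees with getElem
theorem pvGetA_eq (grid : List (List Int)) (i j : Nat) (hi : i < grid.length)
    (hj : j < (grid[i]).length) : pvGetA grid i j = grid[i][j] := by
  simp only [pvGetA, PySem.List.pyGetD_natCast]
  rw [List.getD_eq_getElem grid [] hi, List.getD_eq_getElem _ 0 hj]

-- A returns true iff every row/column index predicate holds
theorem vm_A_iff (grid : List (List Int)) :
    validMatrix grid = true ↔
      ∀ i < grid.length, vmRowP grid grid.length i ∧ vmColP grid grid.length i := by
  rw [validMatrix, vmLoopI_iff]
  constructor
  · intro h i hi
    have hJ := (vmLoopJ_iff grid grid.length (0 + i) grid.length 0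
        PySem.Set.empty PySem.Set.empty).mp (h i hi)
    simp only [Nat.zero_add] at hJ
    exact ⟨⟨fun k hk => (hJ k hk).1, fun k hk k' hk' => ((hJ k hk).2.2.2.2 k' hk').1⟩,
           ⟨fun k hk => (hJ k hk).2.1, fun k hk k' hk' => ((hJ k hk).2.2.2.2 k' hk').2⟩⟩
  · intro h i hi
    apply (vmLoopJ_iff grid grid.length (0 + i) grid.length 0
        PySem.Set.empty PySem.Set.empty).mpr
    simp only [Nat.zero_add]
    intro k hk
    obtain ⟨⟨hrb, hrn⟩, ⟨hcb, hcn⟩⟩ := h i hi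
    exact ⟨hrb k hk, hcb k hk, by simp [PySem.Set.empty], by simp [PySem.Set.empty],
           fun k' hk' => ⟨hrn k hk k' hk', hcn k hk k' hk'⟩⟩

-- a grid whose first cell is already out of 1..n is rejected immediately by both programs
theorem vm_firstcell_false (x : Int) (xs : List Int) (rest : List (List Int))
    (hx : x < 1 ∨ (((x :: xs) :: rest).length : Int) < x) :
    validMatrix ((x :: xs) :: rest) = false ∧ validMatrix_alt ((x :: xs) :: rest) = false := by
  have hget : pvGetA ((x :: xs) :: rest) 0 0 = x := by
    simp [pvGetA, PySem.List.pyGetD_zero_cons]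
  have hcond : (pvGetA ((x :: xs) :: rest) 0 0 < 1 ||
      pvGetA ((x :: xs) :: rest) 0 0 > (((x :: xs) :: rest).length : Int)) = true := by
    rw [hget]
    simp only [Bool.or_eq_true, decide_eq_true_eq]
    exact hx
  constructor
  · show vmLoopI ((x :: xs) :: rest) ((x :: xs) :: rest).length 0 ((x :: xs) :: rest).length = false
    have hJ : vmLoopJ ((x :: xs) :: rest) ((x :: xs) :: rest).length 0 0
        ((x :: xs) :: rest).length PySem.Set.empty PySem.Set.empty = false := by
      show vmLoopJ _ _ 0 0 (rest.length + 1) _ _ = false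
      rw [vmLoopJ]
      simp only [hcond, if_true]
    show vmLoopI _ _ 0 (rest.length + 1) = false
    rw [vmLoopI]
    simp only [hJ]
    simp
  · have hrow : vmRowPass ((x :: xs) :: rest) (vmExpected ((x :: xs) :: rest).length) = false := by
      have hne : PySem.Set.equal (PySem.Set.ofList (x :: xs))
          (vmExpected ((x :: xs) :: rest).length) = false := by
        rw [Bool.eq_false_iff]
        intro heq
        have hmem := ((PySem.Set.equal_iff _ _).mp heq x).mp
          ((PySem.Set.mem_ofList _ _).mpr (List.mem_cons_self))
        rw [vm_mem_expected] at hmem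
        simp only [List.length_cons] at hx hmem
        push_cast at hx hmem
        omega
      rw [vmRowPass, hne]
      rfl
    show (if vmRowPass ((x :: xs) :: rest) (vmExpected ((x :: xs) :: rest).length) then
        vmColPass ((x :: xs) :: rest) (vmExpected ((x :: xs) :: rest).length) 0
          ((x :: xs) :: rest).length else false) = false
    rw [hrow]
    simp

-- the square case of the verdict
theorem vm_square_case (grid : List (List Int)) (hpre : ∀ row ∈ grid, row.length = grid.length) :
    validMatrix grid = validMatrix_alt grid := by
  have hlen : ∀ (i : Nat) (hi : i < grid.length), (grid[i]).length = grid.length :=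
    fun i hi => hpre _ (grid.getElem_mem hi)
  -- B's side, reduced to the same index predicates
  have hB : validMatrix_alt grid = true ↔
      (∀ i < grid.length, vmRowP grid grid.length i) ∧
      (∀ i < grid.length, vmColP grid grid.length i) := by
    show (if vmRowPass grid (vmExpected grid.length) then
            vmColPass grid (vmExpected grid.length) 0 grid.length else false) = true ↔ _
    simp only [Bool.if_false_right, Bool.and_eq_true, decide_eq_true_eq, vmRowPass_iff,
      vmColPass_iff]
    constructor
    · rintro ⟨hrows, hcols⟩
      constructor
      · intro i hi
        have hr := hrows (grid[i]) (grid.getElem_mem hi)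
        rw [vm_equal_expected_iff _ _ (hlen i hi)] at hr
        obtain ⟨hb, hnd⟩ := hr
        rw [List.Nodup, List.pairwise_iff_getElem] at hnd
        constructor
        · intro k hk
          rw [vmInB, pvGetA_eq grid i k hi (by rw [hlen i hi]; exact hk)]
          exact hb _ (grid[i].getElem_mem (by rw [hlen i hi]; exact hk))
        · intro k hk k' hk'
          rw [pvGetA_eq grid i k hi (by rw [hlen i hi]; exact hk),
              pvGetA_eq grid i k' hi (by rw [hlen i hi]; omega)]
          exact hnd k' k (by rw [hlen i hi]; omega) (by rw [hlen i hi]; exact hk) hk'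
      · intro i hi
        have hc := hcols i hi
        simp only [Nat.zero_add] at hc
        rw [vm_equal_expected_iff _ _ (by rw [List.length_map])] at hc
        obtain ⟨hb, hnd⟩ := hc
        rw [List.Nodup, List.pairwise_iff_getElem] at hnd
        have hentry : ∀ (k : Nat) (hk : k < grid.length),
            (grid.map (fun row => PySem.List.pyGetD row ((i : Nat) : Int) 0))[k]'(by
              rw [List.length_map]; exact hk) = pvGetA grid k i := by
          intro k hk
          rw [List.getElem_map, PySem.List.pyGetD_natCast,
              List.getD_eq_getElem _ 0 (by rw [hlen k hk]; exact hi),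
              pvGetA_eq grid k i hk (by rw [hlen k hk]; exact hi)]
        constructor
        · intro k hk
          have := hb _ ((grid.map (fun row => PySem.List.pyGetD row ((i : Nat) : Int) 0)).getElem_mem
            (by rw [List.length_map]; exact hk))
          rwa [hentry k hk, ← vmInB] at this
        · intro k hk k' hk'
          have := hnd k' k (by rw [List.length_map]; omega) (by rw [List.length_map]; exact hk) hk'
          rwa [hentry k hk, hentry k' (by omega)] at this
    · rintro ⟨hrows, hcols⟩
      constructor
      · intro row hrow
        obtain ⟨i, hi, he⟩ := List.mem_iff_getElem.mp hrow
        obtain ⟨hb, hnd⟩ := hrows i hi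
        rw [← he, vm_equal_expected_iff _ _ (hlen i hi)]
        constructor
        · intro x hx
          obtain ⟨k, hk, hkx⟩ := List.mem_iff_getElem.mp hx
          have := hb k (by rw [← hlen i hi]; exact hk)
          rwa [pvGetA_eq grid i k hi hk, hkx, vmInB] at this
        · rw [List.Nodup, List.pairwise_iff_getElem]
          intro k k' hk hk' hkk'
          have := hnd k' (by rw [← hlen i hi]; exact hk') k hkk'
          rwa [pvGetA_eq grid i k hi hk, pvGetA_eq grid i k' hi hk'] at this
      · intro i hi
        simp only [Nat.zero_add]
        obtain ⟨hb, hnd⟩ := hcols i hi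
        rw [vm_equal_expected_iff _ _ (by rw [List.length_map])]
        have hentry : ∀ (k : Nat) (hk : k < grid.length),
            (grid.map (fun row => PySem.List.pyGetD row ((i : Nat) : Int) 0))[k]'(by
              rw [List.length_map]; exact hk) = pvGetA grid k i := by
          intro k hk
          rw [List.getElem_map, PySem.List.pyGetD_natCast,
              List.getD_eq_getElem _ 0 (by rw [hlen k hk]; exact hi),
              pvGetA_eq grid k i hk (by rw [hlen k hk]; exact hi)]
        constructor
        · intro x hx
          obtain ⟨k, hk, hkx⟩ := List.mem_iff_getElem.mp hx
          rw [List.length_map] at hk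
          have h1 := hb k hk
          simp only [vmInB] at h1
          rw [← hkx, hentry k hk]
          exact h1
        · rw [List.Nodup, List.pairwise_iff_getElem]
          intro k k' hk hk' hkk'
          rw [List.length_map] at hk hk'
          rw [hentry k hk, hentry k' hk']
          exact hnd k' hk' k hkk'
  rw [Bool.eq_iff_iff, vm_A_iff, hB]
  constructor
  · intro h
    exact ⟨fun i hi => (h i hi).1, fun i hi => (h i hi).2⟩
  · rintro ⟨hr, hc⟩ i hi
    exact ⟨hr i hi, hc i hi⟩

-- ===== VERDICT (by name: the statement is the Claim_ definition above) =====
theorem validMatrix_spec : Claim_equal_validMatrix := by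
  intro grid _ hpre
  unfold Spec_validMatrix
  rcases hpre with hpre | ⟨h1, h2, h3⟩
  case _ =>
    exact vm_square_case grid hpre
  case _ =>
    obtain ⟨g0, rest, rfl⟩ := List.exists_cons_of_ne_nil (List.ne_nil_of_length_pos h1)
    simp only [List.getD_cons_zero] at h2 h3
    obtain ⟨x, xs, rfl⟩ := List.exists_cons_of_ne_nil (List.ne_nil_of_length_pos h2)
    simp only [List.getD_cons_zero] at h3
    rw [(vm_firstcell_false x xs rest h3).1, (vm_firstcell_false x xs rest h3).2]
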